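-- pv_equiv track=rewrite | github.com/marekz/pyladies_szkolenie | 01_PL_2017_10_17/Z_011_waga.py | wyszukajMaxWspolna
-- ===== SOURCE A (Python) =====
-- def wyszukajMaxWspolna(a, b):
--     tmpA = 1
--     wskaznikB = 1
--     tmpB = 1
--     tmpBT = []
--
--     for licznik in range(10):
--         tmpA = a * licznik
--         if tmpA >= wskaznikB:
--             wskaznikB = wskaznikB + 1
--             tmpB = b * wskaznikB
--             tmpBT.append(tmpB)
--
--             for element in tmpBT:
--                 if (element % a == 0):
--                     return element
-- ===== SOURCE B (Python) =====
-- def wyszukajMaxWspolna(a, b):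
--     # Closed form of A's gated state machine: for a <= 0 the gate never opens
--     # and A returns None; for a >= 1 the gate opens on every licznik 1..9,
--     # producing exactly the multiples b*k for k = 2..10, and A returns the
--     # first one divisible by a (earlier ones are already known non-divisible).
--     if a <= 0:
--         return None
--     return next((b * k for k in range(2, 11) if (b * k) % a == 0), None)
-- ===== Notes on version B (the rewrite author's own statement) =====
-- stated objective: simpler
-- what changed: B replaces A's gated state machine (wskaznikB counter, accumulated list, nested rescan) with its closed form: None for a <= 0, otherwise the first multiple b*k with k in 2..10 divisible by a.
import Mathlib
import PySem

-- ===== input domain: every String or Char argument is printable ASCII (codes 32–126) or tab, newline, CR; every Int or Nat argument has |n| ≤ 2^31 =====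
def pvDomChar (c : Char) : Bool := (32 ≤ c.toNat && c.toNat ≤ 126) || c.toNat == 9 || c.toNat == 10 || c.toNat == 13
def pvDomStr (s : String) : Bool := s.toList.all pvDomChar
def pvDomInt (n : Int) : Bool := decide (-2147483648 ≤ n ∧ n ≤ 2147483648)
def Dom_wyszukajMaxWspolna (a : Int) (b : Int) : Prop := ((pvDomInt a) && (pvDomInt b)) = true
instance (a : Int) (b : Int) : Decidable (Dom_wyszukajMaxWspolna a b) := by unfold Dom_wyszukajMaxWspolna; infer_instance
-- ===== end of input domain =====

-- B replaces A's gated state machine (counter, accumulated list, nested rescan) with its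
-- closed form: None for a <= 0, else the first multiple b*k, k = 2..10, divisible by a (simpler).


-- ===== PORT A =====
-- loop over range(10) with state (wskaznikB, tmpBT); inner 'for element in tmpBT' = List.find?
def pvGoA (a b : Int) (wskaznikB : Int) (tmpBT : List Int) : List Int → Option Int
  | [] => none
  | licznik :: rest =>
    let tmpA := a * licznik
    if tmpA ≥ wskaznikB then
      let wskaznikB' := wskaznikB + 1
      let tmpB := b * wskaznikB'
      let tmpBT' := tmpBT ++ [tmpB]
      match tmpBT'.find? (fun element => PySem.Int.mod element a == 0) with
      | some element => some element
      | none => pvGoA a b wskaznikB' tmpBT' rest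
    else pvGoA a b wskaznikB tmpBT rest

def wyszukajMaxWspolna (a : Int) (b : Int) : Option Int :=
  pvGoA a b 1 [] (PySem.List.pyRange 0 10 1)

-- ===== PORT B =====
-- closed form: none for a ≤ 0; else first k in range(2,11) with (b*k) % a == 0, returned as b*k
def wyszukajMaxWspolna_alt (a : Int) (b : Int) : Option Int :=
  if a ≤ 0 then none
  else ((PySem.List.pyRange 2 11 1).find? (fun k => PySem.Int.mod (b * k) a == 0)).map (fun k => b * k)

-- ===== PRECONDITION & SPEC =====
def Spec_wyszukajMaxWspolna (a : Int) (b : Int) (out : Option Int) : Prop := out = wyszukajMaxWspolna_alt a b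
instance (a : Int) (b : Int) (out : Option Int) : Decidable (Spec_wyszukajMaxWspolna a b out) := by unfold Spec_wyszukajMaxWspolna; infer_instance

-- ===== CLAIM (what is proved, stated in full; the proofs are below) =====
def Claim_equal_wyszukajMaxWspolna : Prop := ∀ (a : Int) (b : Int), Dom_wyszukajMaxWspolna a b → Spec_wyszukajMaxWspolna a b (wyszukajMaxWspolna a b)

-- ===== LEMMAS AND PROOFS =====

-- a ≤ 0: the gate a*licznik ≥ wskaznikB never opens (indices are ≥ 0, wskaznikB ≥ 1), A returns none
theorem pvGoA_none_of_nonpos (a b : Int) (ha : a ≤ 0) :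
    ∀ (L : List Int), (∀ l ∈ L, 0 ≤ l) → ∀ (w : Int) (acc : List Int), 1 ≤ w →
      pvGoA a b w acc L = none := by
  intro L
  induction L with
  | nil => intro _ w acc _; rfl
  | cons l rest ih =>
    intro hL w acc hw
    have hl : 0 ≤ l := hL l (by simp)
    have hmul : a * l ≤ 0 := mul_nonpos_of_nonpos_of_nonneg ha hl
    have : ¬ (a * l ≥ w) := by omega
    simp only [pvGoA, ge_iff_le, if_neg this]
    exact ih (fun x hx => hL x (by simp [hx])) w acc hw

-- consecutive integers j, j+1, …, j+n-1 (proof helper)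
def pvIdxs : Nat → Int → List Int
  | 0, _ => []
  | n+1, j => j :: pvIdxs n (j + 1)

-- a ≥ 1: from index j (1 ≤ j) with wskaznikB = j and every element of acc failing the test,
-- A's loop over [j, j+1, …] equals the first b*k, k = j+1, …, j+n, divisible by a
theorem pvGoA_pos (a b : Int) (ha : 1 ≤ a) :
    ∀ (n : Nat) (j : Int), 1 ≤ j → ∀ (acc : List Int),
      (∀ e ∈ acc, ¬ (PySem.Int.mod e a == 0) = true) →
      pvGoA a b j acc (pvIdxs n j) =
        ((pvIdxs n (j + 1)).find?
            (fun k => PySem.Int.mod (b * k) a == 0)).map (fun k => b * k) := by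
  intro n
  induction n with
  | zero => intro j _ acc _; rfl
  | succ n ih =>
    intro j hj acc hacc
    simp only [pvIdxs]
    have hgate : a * j ≥ j := le_mul_of_one_le_left (by omega) ha
    simp only [pvGoA, ge_iff_le, if_pos hgate]
    have hfind : acc.find? (fun element => PySem.Int.mod element a == 0) = none := by
      rw [List.find?_eq_none]; exact hacc
    rw [List.find?_append, hfind, Option.none_or]
    by_cases hdiv : (PySem.Int.mod (b * (j + 1)) a == 0) = true
    · simp [List.find?, hdiv]
    · simp only [List.find?, hdiv, Bool.false_eq_true, if_false]
      exact ih (j + 1) (by omega) (acc ++ [b * (j + 1)]) (by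
        intro e he
        rcases List.mem_append.mp he with h | h
        · exact hacc e h
        · simp at h; subst h; exact hdiv)

-- ===== VERDICT (by name: the statement is the Claim_ definition above) =====
theorem wyszukajMaxWspolna_spec : Claim_equal_wyszukajMaxWspolna := by
  intro a b _
  unfold Spec_wyszukajMaxWspolna wyszukajMaxWspolna wyszukajMaxWspolna_alt
  by_cases ha : a ≤ 0
  · rw [if_pos ha]
    exact pvGoA_none_of_nonpos a b ha (PySem.List.pyRange 0 10 1) (by decide) 1 [] le_rfl
  · rw [if_neg ha]
    have ha1 : 1 ≤ a := by omega
    have h0 : PySem.List.pyRange 0 10 1 = 0 :: pvIdxs 9 1 := by decide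
    have h2 : PySem.List.pyRange 2 11 1 = pvIdxs 9 (1 + 1) := by decide
    rw [h0, h2]
    have : ¬ (a * (0 : Int) ≥ 1) := by omega
    simp only [pvGoA, ge_iff_le, if_neg this]
    exact pvGoA_pos a b ha1 9 1 le_rfl [] (by intro e he; cases he)
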